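-- pv_equiv track=rewrite | github.com/shiningsunnyday/PT-BPE | foldingdiff/annotations.py | group_segments
-- ===== SOURCE A (Python) =====
-- def group_segments(res_ss_list):
--     segments = []
--     if not res_ss_list:
--         return segments
--     # Sort by residue number
--     res_ss_list.sort(key=lambda x: x[0])
--     current_ss = res_ss_list[0][1]
--     start = res_ss_list[0][0]
--     end = start
--     for res, ss in res_ss_list[1:]:
--         if ss == current_ss and res == end + 1:
--             # Continue the segment
--             end = res
--         else:
--             segments.append((current_ss, start, end))
--             current_ss = ss
--             start = res
--             end = res
--     segments.append((current_ss, start, end))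
--     return segments
-- ===== SOURCE B (Python) =====
-- def group_segments(res_ss_list):
--     if not res_ss_list:
--         return []
--     # Sort by residue number (in place, like A)
--     res_ss_list.sort(key=lambda x: x[0])
--     # Staged computation: tag segment boundaries via adjacent pairs, then zip
--     # the list of segment starts with the list of segment ends.
--     pairs = list(zip(res_ss_list, res_ss_list[1:]))
--     starts = [res_ss_list[0]] + [c for p, c in pairs if c[1] != p[1] or c[0] != p[0] + 1]
--     ends = [p for p, c in pairs if c[1] != p[1] or c[0] != p[0] + 1] + [res_ss_list[-1]]
--     return [(ss, r0, r1) for (r0, ss), (r1, _) in zip(starts, ends)]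
-- ===== Notes on version B (the rewrite author's own statement) =====
-- stated objective: alternative
-- what changed: Replaces A's single-pass current_ss/start/end state machine with staged passes: zip the sorted list with its own tail to mark segment boundaries, build the lists of segment starts and segment ends by filtering those adjacent pairs, and zip starts with ends to form the output.
import Mathlib
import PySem

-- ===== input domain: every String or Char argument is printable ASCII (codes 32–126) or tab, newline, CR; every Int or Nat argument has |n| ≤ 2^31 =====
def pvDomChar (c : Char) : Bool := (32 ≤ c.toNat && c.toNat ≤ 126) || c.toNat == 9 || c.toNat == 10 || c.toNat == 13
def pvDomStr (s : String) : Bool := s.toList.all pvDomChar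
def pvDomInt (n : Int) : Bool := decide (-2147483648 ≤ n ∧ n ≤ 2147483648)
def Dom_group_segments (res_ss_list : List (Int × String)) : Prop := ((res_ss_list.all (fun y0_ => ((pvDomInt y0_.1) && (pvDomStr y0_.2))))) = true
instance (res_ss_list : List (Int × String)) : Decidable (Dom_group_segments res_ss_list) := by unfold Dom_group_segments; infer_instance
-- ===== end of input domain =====

-- B replaces A's current_ss/start/end state machine with staged passes: adjacent
-- pairs (zip with the tail) mark segment boundaries, the segment-start and
-- segment-end lists are filtered from them, and the output is their zip
-- (alternative decomposition; both A and B sort the argument in place in Python).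


-- ===== PORT A =====
-- A's loop body: state (segments, current_ss, start, end), exactly Python's updates.
def pvStepA (acc : List (String × Int × Int) × String × Int × Int) (p : Int × String) :
    List (String × Int × Int) × String × Int × Int :=
  if p.2 == acc.2.1 && p.1 == acc.2.2.2 + 1 then
    (acc.1, acc.2.1, acc.2.2.1, p.1)
  else
    (acc.1 ++ [(acc.2.1, acc.2.2.1, acc.2.2.2)], p.2, p.1, p.1)

-- A's code after the sort: read current_ss/start/end off the first element, fold
-- the loop over the tail, then append the final segment.
def pvBodyA : List (Int × String) → List (String × Int × Int)
  | [] => []  -- unreachable: the sorted list is nonempty here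
  | (r0, s0) :: rest =>
    let st := rest.foldl pvStepA ([], s0, r0, r0)
    st.1 ++ [(st.2.1, st.2.2.1, st.2.2.2)]

def group_segments (res_ss_list : List (Int × String)) : List (String × Int × Int) :=
  if res_ss_list.isEmpty then []
  else pvBodyA (PySem.List.sorted res_ss_list (fun x => x.1))

-- ===== PORT B =====
-- B's boundary test on an adjacent pair (p, c): c starts a new segment.
def pvIsBreak (p c : Int × String) : Bool := !(c.2 == p.2) || !(c.1 == p.1 + 1)

-- indexing in B (res_ss_list[0], res_ss_list[-1]) is always in range: the list is
-- nonempty on this branch, so pyGetD with a dummy default is exact.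
def group_segments_alt (res_ss_list : List (Int × String)) : List (String × Int × Int) :=
  if res_ss_list.isEmpty then []
  else
    let s := PySem.List.sorted res_ss_list (fun x => x.1)
    let pairs := s.zip (PySem.List.slice s (some 1) none)   -- zip(s, s[1:])
    let brk := pairs.filter (fun pc => pvIsBreak pc.1 pc.2)
    let starts := PySem.List.pyGetD s 0 (0, "") :: brk.map (·.2)
    let ends := brk.map (·.1) ++ [PySem.List.pyGetD s (-1) (0, "")]
    (starts.zip ends).map (fun q => (q.1.2, q.1.1, q.2.1))

-- ===== PRECONDITION & SPEC =====
def Spec_group_segments (res_ss_list : List (Int × String)) (out : List (String × Int × Int)) : Prop := out = group_segments_alt res_ss_list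
instance (res_ss_list : List (Int × String)) (out : List (String × Int × Int)) : Decidable (Spec_group_segments res_ss_list out) := by unfold Spec_group_segments; infer_instance

-- ===== CLAIM (what is proved, stated in full; the proofs are below) =====
def Claim_equal_group_segments : Prop := ∀ (res_ss_list : List (Int × String)), Dom_group_segments res_ss_list → Spec_group_segments res_ss_list (group_segments res_ss_list)

-- ===== LEMMAS AND PROOFS =====

-- A's loop, written as the structural recursion it computes (accumulator made explicit).
def pvLoopA (cur : String) (start e : Int) : List (Int × String) → List (String × Int × Int)
  | [] => [(cur, start, e)]
  | (r, s) :: rest =>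
    if s == cur && r == e + 1 then pvLoopA cur start r rest
    else (cur, start, e) :: pvLoopA s r r rest

theorem foldA_eq (rest : List (Int × String)) :
    ∀ (segs : List (String × Int × Int)) (cur : String) (start e : Int),
    (rest.foldl pvStepA (segs, cur, start, e)).1
      ++ [((rest.foldl pvStepA (segs, cur, start, e)).2.1,
           (rest.foldl pvStepA (segs, cur, start, e)).2.2.1,
           (rest.foldl pvStepA (segs, cur, start, e)).2.2.2)]
      = segs ++ pvLoopA cur start e rest := by
  induction rest with
  | nil => intro segs cur start e; simp [pvLoopA]
  | cons p t ih =>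
    intro segs cur start e
    obtain ⟨r, s⟩ := p
    by_cases h : (s == cur && r == e + 1) = true
    · simp only [List.foldl_cons, pvStepA, h, if_true, pvLoopA]
      exact ih segs cur start r
    · rw [Bool.not_eq_true] at h
      simp only [List.foldl_cons, pvStepA, h, Bool.false_eq_true, if_false, pvLoopA]
      rw [ih (segs ++ [(cur, start, e)]) s r r]
      simp

-- B's core on a nonempty list (head h, tail t), in the clean cons form.
def pvB (h : Int × String) (t : List (Int × String)) : List (String × Int × Int) :=
  let brk := ((h :: t).zip t).filter (fun pc => pvIsBreak pc.1 pc.2)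
  ((h :: brk.map (·.2)).zip (brk.map (·.1) ++ [t.getLastD h])).map
    (fun q => (q.1.2, q.1.1, q.2.1))

-- overwrite the start residue of the first output segment
def pvSetStart (v : Int) : List (String × Int × Int) → List (String × Int × Int)
  | [] => []
  | (ss, _, e) :: r => (ss, v, e) :: r

theorem pvB_setStart_head (h : Int × String) (t : List (Int × String)) :
    pvSetStart h.1 (pvB h t) = pvB h t := by
  obtain ⟨r, s⟩ := h
  simp only [pvB]
  generalize (((r, s) :: t).zip t).filter (fun pc => pvIsBreak pc.1 pc.2) = brk
  rcases brk with _ | ⟨⟨p, c⟩, l⟩ <;> simp [pvSetStart]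

-- Core: A's state machine equals B's staged starts/ends zip, with the pending
-- segment's start overridden.
theorem loopA_eq_pvB (rest : List (Int × String)) :
    ∀ (cur : String) (start e : Int),
    pvLoopA cur start e rest = pvSetStart start (pvB (e, cur) rest) := by
  induction rest with
  | nil => intro cur start e; simp [pvLoopA, pvB, pvSetStart]
  | cons p t ih =>
    intro cur start e
    obtain ⟨r, s⟩ := p
    by_cases h : s = cur ∧ r = e + 1
    · obtain ⟨hs, hr⟩ := h
      have hcond : (s == cur && r == e + 1) = true := by simp [hs, hr]
      have hbrk : pvIsBreak (e, cur) (r, s) = false := by simp [pvIsBreak, hs, hr]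
      simp only [pvLoopA, hcond, if_true]
      rw [ih cur start r]
      simp only [pvB, List.zip_cons_cons, List.filter_cons, hbrk, Bool.false_eq_true,
        if_false, List.getLastD_cons]
      subst hs hr
      generalize (((e + 1, s) :: t).zip t).filter (fun pc => pvIsBreak pc.1 pc.2) = brk
      rcases brk with _ | ⟨⟨p, c⟩, l⟩ <;> simp [pvSetStart]
    · have hcond : (s == cur && r == e + 1) = false := by
        rcases Decidable.em (s = cur) with hs | hs
        · simp [hs]; intro h'; exact h ⟨hs, h'⟩
        · simp [hs]
      have hbrk : pvIsBreak (e, cur) (r, s) = true := by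
        rcases Decidable.em (s = cur) with hs | hs
        · simp only [pvIsBreak, hs, beq_self_eq_true, Bool.not_true, Bool.false_or,
            Bool.not_eq_true', beq_eq_false_iff_ne, ne_eq]
          intro h'; exact h ⟨hs, h'⟩
        · simp [pvIsBreak, hs]
      simp only [pvLoopA, hcond, Bool.false_eq_true, if_false]
      rw [ih s r r]
      rw [pvB_setStart_head (r, s) t]
      simp only [pvB, List.zip_cons_cons, List.filter_cons, hbrk, if_true,
        List.getLastD_cons, List.map_cons, pvSetStart]
      rfl

-- bridge B's port (slice / pyGetD) to the cons form pvB
theorem alt_eq_pvB (h : Int × String) (t : List (Int × String)) :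
    (let s := h :: t
     let pairs := s.zip (PySem.List.slice s (some 1) none)
     let brk := pairs.filter (fun pc => pvIsBreak pc.1 pc.2)
     let starts := PySem.List.pyGetD s 0 (0, "") :: brk.map (·.2)
     let ends := brk.map (·.1) ++ [PySem.List.pyGetD s (-1) (0, "")]
     (starts.zip ends).map (fun q => (q.1.2, q.1.1, q.2.1))) = pvB h t := by
  have hne : (h :: t) ≠ ([] : List (Int × String)) := by simp
  simp only [PySem.List.slice_from_one, List.tail_cons,
    PySem.List.pyGetD_zero_cons, PySem.List.pyGetD_neg_one _ _ hne, pvB]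
  rw [List.getLast_eq_getLastD hne]

-- ===== VERDICT (by name: the statement is the Claim_ definition above) =====
theorem group_segments_spec : Claim_equal_group_segments := by
  intro res_ss_list _
  unfold Spec_group_segments group_segments group_segments_alt
  by_cases hemp : res_ss_list.isEmpty
  · simp [hemp]
  · simp only [hemp, Bool.false_eq_true, if_false]
    rcases hs : PySem.List.sorted res_ss_list (fun x => x.1) with _ | ⟨⟨r0, s0⟩, rest⟩
    · rw [PySem.List.sorted_eq_nil_iff] at hs
      simp [hs] at hemp
    · simp only [pvBodyA]
      rw [foldA_eq rest [] s0 r0 r0, List.nil_append]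
      rw [loopA_eq_pvB rest s0 r0 r0]
      rw [show pvSetStart r0 (pvB (r0, s0) rest) = pvB (r0, s0) rest from
        pvB_setStart_head (r0, s0) rest]
      exact (alt_eq_pvB (r0, s0) rest).symm
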